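-- pv_equiv track=rewrite | github.com/PRABHU170401/cone-app | main.py | calculate
-- ===== SOURCE A (Python) =====
-- def calculate(length, width, height, extra):
--     try:
--         length, width, height, extra = (
--             int(length), int(width), int(height), int(extra)
--         )
--     except Exception:
--         return None
--     if height < 0:
--         return None
--     total = sum((length - i) * (width - i) for i in range(height))
--     return total + extra
-- ===== SOURCE B (Python) =====
-- def calculate(length, width, height, extra):
--     try:
--         l, w, h, e = int(length), int(width), int(height), int(extra)
--     except Exception:
--         return None
--     if h < 0:
--         return None
--     # closed-form: sum_{i=0}^{h-1} (l-i)(w-i) = h*l*w - (l+w)*h*(h-1)/2 + (h-1)*h*(2h-1)/6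
--     return h * l * w - (l + w) * h * (h - 1) // 2 + (h - 1) * h * (2 * h - 1) // 6 + e
-- ===== Notes on version B (the rewrite author's own statement) =====
-- stated objective: faster
-- what changed: replaced the O(height) summation loop over range(height) with the exact closed-form polynomial sum h*l*w - (l+w)*h*(h-1)/2 + (h-1)*h*(2h-1)/6, computed with integer arithmetic
import Mathlib
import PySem

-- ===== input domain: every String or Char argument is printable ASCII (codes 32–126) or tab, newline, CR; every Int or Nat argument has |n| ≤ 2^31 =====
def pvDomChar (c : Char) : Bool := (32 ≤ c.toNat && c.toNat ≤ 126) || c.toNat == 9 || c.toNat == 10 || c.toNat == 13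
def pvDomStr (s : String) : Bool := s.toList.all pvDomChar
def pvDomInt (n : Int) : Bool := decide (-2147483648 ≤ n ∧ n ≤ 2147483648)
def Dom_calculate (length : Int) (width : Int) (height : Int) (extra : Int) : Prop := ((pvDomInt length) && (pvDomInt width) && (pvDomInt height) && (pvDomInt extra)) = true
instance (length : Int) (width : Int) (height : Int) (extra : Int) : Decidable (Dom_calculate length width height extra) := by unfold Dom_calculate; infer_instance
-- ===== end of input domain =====

-- B replaces A's O(height) summation loop with the exact closed-form polynomial sum (O(1)).
-- (On Int arguments Python's int() conversion always succeeds, so the try/except never fires.)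

-- ===== PORT A =====
def calculate (length : Int) (width : Int) (height : Int) (extra : Int) : Option Int :=
  -- int(x) on an int is the identity and never raises, so the try/except block is a no-op here
  if height < 0 then none
  else
    let total := (PySem.List.pyRange 0 height 1).foldl
      (fun acc i => acc + (length - i) * (width - i)) 0
    some (total + extra)

-- ===== PORT B =====
def calculate_alt (length : Int) (width : Int) (height : Int) (extra : Int) : Option Int :=
  if height < 0 then none
  else
    some (height * length * width
      - PySem.Int.floordiv ((length + width) * height * (height - 1)) 2
      + PySem.Int.floordiv ((height - 1) * height * (2 * height - 1)) 6
      + extra)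

-- ===== PRECONDITION & SPEC =====
def Spec_calculate (length : Int) (width : Int) (height : Int) (extra : Int) (out : Option Int) : Prop := out = calculate_alt length width height extra
instance (length : Int) (width : Int) (height : Int) (extra : Int) (out : Option Int) : Decidable (Spec_calculate length width height extra out) := by unfold Spec_calculate; infer_instance

-- ===== CLAIM (what is proved, stated in full; the proofs are below) =====
def Claim_equal_calculate : Prop := ∀ (length : Int) (width : Int) (height : Int) (extra : Int), Dom_calculate length width height extra → Spec_calculate length width height extra (calculate length width height extra)

-- ===== LEMMAS AND PROOFS =====

-- six times A's loop sum, in division-free polynomial form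
theorem pv_sum_six (L W : Int) (n : Nat) :
    6 * (PySem.List.pyRange 0 (n : Int) 1).foldl
        (fun acc i => acc + (L - i) * (W - i)) 0
      = 6 * (n : Int) * L * W - 3 * (L + W) * (n : Int) * ((n : Int) - 1)
        + ((n : Int) - 1) * (n : Int) * (2 * (n : Int) - 1) := by
  induction n with
  | zero => simp
  | succ m ih =>
    have hsplit : PySem.List.pyRange 0 ((m : Int) + 1) 1
        = PySem.List.pyRange 0 (m : Int) 1 ++ [(m : Int)] :=
      PySem.List.pyRange_one_succ_right (by exact_mod_cast Int.natCast_nonneg m)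
    push_cast
    rw [hsplit, List.foldl_append]
    simp only [List.foldl_cons, List.foldl_nil]
    linear_combination ih

theorem pv_dvd2 (x : Int) : (2 : Int) ∣ x * (x - 1) := by
  have : ((x * (x - 1) : Int) : ZMod 2) = 0 := by
    push_cast
    generalize (x : ZMod 2) = y
    revert y; decide
  exact (ZMod.intCast_zmod_eq_zero_iff_dvd _ 2).mp this

theorem pv_dvd6 (x : Int) : (6 : Int) ∣ (x - 1) * x * (2 * x - 1) := by
  have : (((x - 1) * x * (2 * x - 1) : Int) : ZMod 6) = 0 := by
    push_cast
    generalize (x : ZMod 6) = y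
    revert y; decide
  exact (ZMod.intCast_zmod_eq_zero_iff_dvd _ 6).mp this

-- floordiv by a positive divisor that divides exactly
theorem pv_floordiv_exact (a b : Int) (h : b ∣ a) :
    b * PySem.Int.floordiv a b = a := by
  simp [PySem.Int.floordiv]
  rw [Int.fdiv_eq_ediv_of_dvd h]
  exact Int.mul_ediv_cancel' h

-- ===== VERDICT (by name: the statement is the Claim_ definition above) =====
theorem calculate_spec : Claim_equal_calculate := by
  intro L W H E _
  unfold Spec_calculate calculate calculate_alt
  by_cases h : H < 0
  · simp [h]
  · simp only [h, if_false]
    have hH : 0 ≤ H := le_of_not_gt h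
    obtain ⟨n, rfl⟩ : ∃ n : Nat, H = (n : Int) := ⟨H.toNat, (Int.toNat_of_nonneg hH).symm⟩
    have hs := pv_sum_six L W n
    have h2 : (2 : Int) ∣ (L + W) * (n : Int) * ((n : Int) - 1) := by
      have := pv_dvd2 (n : Int)
      calc (2 : Int) ∣ (n : Int) * ((n : Int) - 1) := this
        _ ∣ (L + W) * ((n : Int) * ((n : Int) - 1)) := Dvd.dvd.mul_left dvd_rfl _
        _ = (L + W) * (n : Int) * ((n : Int) - 1) := by ring
    have h6 := pv_dvd6 (n : Int)
    have e2 := pv_floordiv_exact _ 2 h2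
    have e6 := pv_floordiv_exact _ 6 h6
    congr 1
    set F2 := PySem.Int.floordiv ((L + W) * (n : Int) * ((n : Int) - 1)) 2 with hF2
    set F6 := PySem.Int.floordiv (((n : Int) - 1) * (n : Int) * (2 * (n : Int) - 1)) 6 with hF6
    set S := (PySem.List.pyRange 0 (n : Int) 1).foldl
        (fun acc i => acc + (L - i) * (W - i)) 0 with hS
    linarith [hs, e2, e6]
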